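/- GENERATED by tools/from_farm_form.py from prooffarm-gif/accepted/GifAddExtensionBlock.1/Proof.lean (a worked proof of the farm's unit `GifAddExtensionBlock.1`,
   accepted by the verdict) — do not edit. -/
import Gif.Spec.Units.GifAddExtensionBlock_1
import Gif.Spec.Proved.GifAddExtensionBlock_1_Lemmas

open X86 X86.User Asan ProgX.Base ProgX.Base.Spec Gif.Spec

/-- Segment 1 of `GifAddExtensionBlock` (107B40H … 107BA6H, 107C24H … 107C48H; gifalloc.c l.231-245): the prologue, then the array of
the pending list gets a slot for one more block. The case split is on the GHOST forest, before the walk (the code's test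
`*blocks == NULL` decides the same: `GifOK.pend_null_iff`):
  * no pending list: `malloc(24)` (`gab1_first_to_malloc`), the store of `*blocks` (`gab1_first_from_malloc`): `AfterArray` for the
    empty array of one slot, or — `malloc` returned NULL — for no list at all (segment 2 returns GIF_ERROR then);
  * the pending list `x`: `reallocarray(x.arr, length + 1, 24)` (`gab1_grow_to_realloc`: the three outcomes of `ReallocPost`):
    FAILED: `Done` with the heap and the forest of the entry (`gab1_grow_failed`: the old array still owned, nothing lost);
    IN PLACE or MOVED: the store of `*blocks` (`gab1_grow_store`): `AfterArray` for the old blocks in the new array. -/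
theorem Gif.Spec.Proved.GifAddExtensionBlock_1_ok : Gif.Spec.GifAddExtensionBlock_1.Statement := by
  intro Lay hLay μ hμ u₀ hcode h_realloc h_malloc h_load8 h_load4 h_store8 H rest frames F R len e ret he hpre
  cases hpend : F.pend with
  | none =>
    -- 107B40H → 107C2EH (ret12): `malloc(24)`
    refine (Gif.Spec.GifAddExtensionBlock_1.gab1_first_to_malloc Lay hLay μ hμ u₀ hcode h_malloc h_load8 H rest frames F R len e
      ret he hpre hpend).trans ?_
    intro w hw
    obtain ⟨Hn, hmid⟩ := hw
    -- 107C2EH → 107BA6H: the store of `*blocks`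
    refine ReachVia.mono (Gif.Spec.GifAddExtensionBlock_1.gab1_first_from_malloc Lay hLay μ hμ u₀ hcode h_store8 H rest frames F
      R len e ret he hpre hpend Hn w hmid) ?_
    intro z hz
    exact Or.inl hz
  | some x =>
    -- 107B40H → 107B8FH (ret3): `reallocarray`
    refine (Gif.Spec.GifAddExtensionBlock_1.gab1_grow_to_realloc Lay hLay μ hμ u₀ hcode h_realloc h_load8 h_load4 H rest frames F R
      len e ret he hpre x hpend).trans ?_
    intro w hw
    obtain ⟨Hn, hmid⟩ := hw
    rcases hmid.out with ⟨hrax, hHn, howns⟩ | ⟨hrax, howns, hcopy⟩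
    · -- FAILED: 107B8FH → 107C4DH
      subst hHn
      refine ReachVia.mono (Gif.Spec.GifAddExtensionBlock_1.gab1_grow_failed Lay hLay μ hμ u₀ hcode Hn rest frames F R len e ret he
        hpre x w hmid hrax howns) ?_
      intro z hz
      exact Or.inr hz
    · -- IN PLACE or MOVED: 107B8FH → 107BA6H
      refine ReachVia.mono (Gif.Spec.GifAddExtensionBlock_1.gab1_grow_store Lay hLay μ hμ u₀ hcode h_store8 H rest frames F R len e
        ret he hpre x hpend Hn w hmid hrax howns hcopy) ?_
      intro z hz
      exact Or.inl hz
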